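-- pv_equiv track=rewrite | github.com/Aresh-P/HackCMU2021 | groups_to_output.py | groups_to_output
-- ===== SOURCE A (Python) =====
-- def groups_to_output(groups):
--     """
--     groups is of the form:
--     For each student (list):
--         For each time (list):
--             The study group number (int) the student is assigned to at that time (-1 for no study group).
--
--     Returns:
--     For each student (list):
--         For each study session (list sorted by time):
--     {"start": time, "stop": time, "study group number": int, "subject": int}
--     stop time is the first time interval after the meeting is over! It is not included in the meeting!
--     """
--     sessions = []
--     for student in range(len(groups)):
--         student_sessions = []
--         time = 0
--         ongoing_session = None
--         while time < len(groups[0]):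
--             if ongoing_session == None:
--                 if groups[student][time] != -1:
--                     ongoing_session = {}
--                     ongoing_session["start"] = time
--                     ongoing_session["study group number"] = groups[student][time]
--                     ongoing_session["subject"] = int(groups[student][time] / len(groups))
--             else:
--                 if groups[student][time] != ongoing_session["study group number"]:
--                     ongoing_session["stop"] = time
--                     student_sessions.append(ongoing_session)
--                     if groups[student][time] == -1:
--                         ongoing_session = None
--                     else:
--                         ongoing_session = {}
--                         ongoing_session["start"] = time
--                         ongoing_session["study group number"] = groups[student][time]
--                         ongoing_session["subject"] = int(groups[student][time] / len(groups))
--             time += 1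
--
--         if ongoing_session != None:
--             ongoing_session["stop"] = len(groups[0])
--             student_sessions.append(ongoing_session)
--             ongoing_session = None
--
--         sessions.append(student_sessions)
--     return sessions
-- ===== SOURCE B (Python) =====
-- def groups_to_output(groups):
--     if not groups:
--         return []
--     T = len(groups[0])
--     n = len(groups)
--     out = []
--     for row in groups:
--         # run-length encode the first T time slots
--         runs = []
--         for v in row[:T]:
--             if runs and runs[-1][0] == v:
--                 runs[-1] = (v, runs[-1][1] + 1)
--             else:
--                 runs.append((v, 1))
--         # one session per run whose value is a real study group
--         sessions = []
--         start = 0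
--         for v, k in runs:
--             if v != -1:
--                 sessions.append({"start": start, "study group number": v,
--                                  "subject": int(v / n), "stop": start + k})
--             start += k
--         out.append(sessions)
--     return out
-- ===== Notes on version B (the rewrite author's own statement) =====
-- stated objective: simpler
-- what changed: B replaces A's per-time-step while-loop state machine (an 'ongoing session' dict mutated and closed on value changes) by run-length encoding each student's first-T slots and emitting one interval per non-(-1) run.
import Mathlib
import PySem

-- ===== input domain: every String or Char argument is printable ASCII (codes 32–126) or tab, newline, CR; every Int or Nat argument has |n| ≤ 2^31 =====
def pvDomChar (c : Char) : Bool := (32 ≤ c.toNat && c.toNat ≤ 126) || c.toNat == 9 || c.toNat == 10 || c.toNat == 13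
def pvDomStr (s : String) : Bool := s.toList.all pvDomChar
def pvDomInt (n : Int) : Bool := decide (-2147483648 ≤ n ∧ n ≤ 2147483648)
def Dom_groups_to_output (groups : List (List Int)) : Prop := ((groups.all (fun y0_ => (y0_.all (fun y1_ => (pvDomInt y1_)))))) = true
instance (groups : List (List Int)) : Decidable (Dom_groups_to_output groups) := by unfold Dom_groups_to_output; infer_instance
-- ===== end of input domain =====

-- B replaces A's per-time-step ongoing-session state machine by run-length encoding each
-- student's first-T slots and emitting one interval per non-(-1) run (objective: simpler).
-- `int(v/len(groups))` is ported as truncated division Int.tdiv, exact on the stated domain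
-- (|v| ≤ 2^31 keeps the float division's truncation equal to exact truncated division for
-- the list sizes the checks draw).

-- ===== PORT A =====
-- the session dict in A's insertion order: start, study group number, subject, stop
def pvMkSession (st sg sub stop : Int) : List (String × Int) :=
  [("start", st), ("study group number", sg), ("subject", sub), ("stop", stop)]

-- the trailing `if ongoing_session != None:` block (stop := len(groups[0]))
def pvFin (e : Int) :
    (List (List (String × Int)) × Option (Int × Int × Int)) → List (List (String × Int))
  | (ss, none) => ss
  | (ss, some (st, sg, sub)) => ss ++ [pvMkSession st sg sub e]

-- A's while-loop; the ongoing session is its (start, study group number, subject) triple,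
-- fuel = T - time.  Indices are always ≥ 0, so groups[student][time] is List.getD (in
-- range under Pre_; out of range Python raises and the input is excluded by Pre_).
def pvALoop (row : List Int) (n : Int) :
    Nat → Nat → List (List (String × Int)) → Option (Int × Int × Int) →
    (List (List (String × Int)) × Option (Int × Int × Int))
  | 0, _, ss, og => (ss, og)
  | fuel + 1, time, ss, og =>
    let v := row.getD time 0
    match og with
    | none =>
      if v ≠ -1 then pvALoop row n fuel (time + 1) ss (some ((time : Int), v, v.tdiv n))
      else pvALoop row n fuel (time + 1) ss none
    | some (st, sg, sub) =>
      if v ≠ sg then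
        let ss' := ss ++ [pvMkSession st sg sub (time : Int)]
        if v = -1 then pvALoop row n fuel (time + 1) ss' none
        else pvALoop row n fuel (time + 1) ss' (some ((time : Int), v, v.tdiv n))
      else pvALoop row n fuel (time + 1) ss og

def groups_to_output (groups : List (List Int)) : List (List (List (String × Int))) :=
  let T := (groups.headD []).length
  let n : Int := groups.length
  (List.range groups.length).foldl
    (fun sessions student =>
      sessions ++ [pvFin (T : Int) (pvALoop (groups.getD student []) n T 0 [] none)]) []

-- ===== PORT B =====
-- Source B's run-length-encoding loop body: `if runs and runs[-1][0] == v: … else: append`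
def pvRunsStep (runs : List (Int × Nat)) (v : Int) : List (Int × Nat) :=
  match runs.getLast? with
  | some (w, k) => if w = v then runs.dropLast ++ [(v, k + 1)] else runs ++ [(v, 1)]
  | none => [(v, 1)]

-- Source B's emission loop body over (sessions, start)
def pvEmitStep (n : Int) (acc : List (List (String × Int)) × Nat) (r : Int × Nat) :
    List (List (String × Int)) × Nat :=
  ((if r.1 ≠ -1 then
      acc.1 ++ [pvMkSession (acc.2 : Int) r.1 (r.1.tdiv n) ((acc.2 + r.2 : Nat) : Int)]
    else acc.1), acc.2 + r.2)

def groups_to_output_alt (groups : List (List Int)) : List (List (List (String × Int))) :=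
  match groups with
  | [] => []
  | g0 :: _ =>
    let T := g0.length
    let n : Int := groups.length
    groups.map (fun row =>
      let runs := (row.take T).foldl pvRunsStep []
      (runs.foldl (pvEmitStep n) ([], 0)).1)

-- ===== PRECONDITION & SPEC =====
-- A reads groups[student][time] for every time < len(groups[0]); Pre_ excludes exactly the
-- ragged inputs (some row shorter than the first) on which that read raises IndexError.
def Pre_groups_to_output (groups : List (List Int)) : Prop :=
  ∀ row ∈ groups, (groups.headD []).length ≤ row.length
instance (groups : List (List Int)) : Decidable (Pre_groups_to_output groups) := by
  unfold Pre_groups_to_output; infer_instance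

def pvWitness_groups_to_output : List (List Int) := [[1, -1, 2], [0, 0, -1]]

def Spec_groups_to_output (groups : List (List Int)) (out : List (List (List (String × Int)))) : Prop := out = groups_to_output_alt groups
instance (groups : List (List Int)) (out : List (List (List (String × Int)))) : Decidable (Spec_groups_to_output groups out) := by unfold Spec_groups_to_output; infer_instance

-- ===== CLAIM (what is proved, stated in full; the proofs are below) =====
def Claim_equal_groups_to_output : Prop := ∀ (groups : List (List Int)), Dom_groups_to_output groups → Pre_groups_to_output groups → Spec_groups_to_output groups (groups_to_output groups)

-- ===== LEMMAS AND PROOFS =====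

-- recursive form of B's emission fold
def pvEmit (n : Int) : List (Int × Nat) → Nat → List (List (String × Int))
  | [], _ => []
  | (v, k) :: rs, start =>
    (if v = -1 then [] else [pvMkSession (start : Int) v (v.tdiv n) ((start + k : Nat) : Int)])
      ++ pvEmit n rs (start + k)

lemma pvEmit_foldl (n : Int) :
    ∀ (rs : List (Int × Nat)) (acc : List (List (String × Int))) (start : Nat),
      (rs.foldl (pvEmitStep n) (acc, start)).1 = acc ++ pvEmit n rs start := by
  intro rs
  induction rs with
  | nil => intro acc start; simp [pvEmit]
  | cons r rs ih =>
    intro acc start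
    obtain ⟨v, k⟩ := r
    by_cases hv : v = -1 <;>
      simp [pvEmit, pvEmitStep, hv, List.foldl_cons, ih, List.append_assoc]

lemma pvRunsStep_ne_nil (acc : List (Int × Nat)) (v : Int) : pvRunsStep acc v ≠ [] := by
  unfold pvRunsStep
  cases h : acc.getLast? with
  | none => simp
  | some p =>
    obtain ⟨w, k⟩ := p
    dsimp only
    split_ifs <;> simp

lemma pvRunsStep_append (rs acc : List (Int × Nat)) (v : Int) (h : acc ≠ []) :
    pvRunsStep (rs ++ acc) v = rs ++ pvRunsStep acc v := by
  unfold pvRunsStep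
  rw [List.getLast?_append_of_ne_nil rs h]
  cases hl : acc.getLast? with
  | none => exact absurd (List.getLast?_eq_none_iff.mp hl) h
  | some p =>
    obtain ⟨w, k⟩ := p
    dsimp only
    split_ifs <;> simp [List.dropLast_append_of_ne_nil, h, List.append_assoc]

lemma pvRuns_foldl_append (l : List Int) :
    ∀ (rs acc : List (Int × Nat)), acc ≠ [] →
      l.foldl pvRunsStep (rs ++ acc) = rs ++ l.foldl pvRunsStep acc := by
  induction l with
  | nil => intro rs acc h; simp
  | cons v l ih =>
    intro rs acc h
    simp only [List.foldl_cons]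
    rw [pvRunsStep_append rs acc v h, ih rs _ (pvRunsStep_ne_nil acc v)]

-- recursive form of A's while-loop, over the list of remaining time slots
def pvAList (n : Int) :
    List Int → Nat → List (List (String × Int)) → Option (Int × Int × Int) →
    (List (List (String × Int)) × Option (Int × Int × Int))
  | [], _, ss, og => (ss, og)
  | v :: rest, time, ss, og =>
    match og with
    | none =>
      if v ≠ -1 then pvAList n rest (time + 1) ss (some ((time : Int), v, v.tdiv n))
      else pvAList n rest (time + 1) ss none
    | some (st, sg, sub) =>
      if v ≠ sg then
        let ss' := ss ++ [pvMkSession st sg sub (time : Int)]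
        if v = -1 then pvAList n rest (time + 1) ss' none
        else pvAList n rest (time + 1) ss' (some ((time : Int), v, v.tdiv n))
      else pvAList n rest (time + 1) ss og

lemma pvALoop_eq_pvAList (row : List Int) (n : Int) :
    ∀ (fuel time : Nat) (ss : List (List (String × Int))) (og : Option (Int × Int × Int)),
      time + fuel ≤ row.length →
      pvALoop row n fuel time ss og = pvAList n ((row.drop time).take fuel) time ss og := by
  intro fuel
  induction fuel with
  | zero => intro time ss og h; simp [pvALoop, pvAList]
  | succ fuel ih =>
    intro time ss og h
    have ht : time < row.length := by omega
    have hdrop : row.drop time = row[time] :: row.drop (time + 1) :=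
      List.drop_eq_getElem_cons ht
    have hget : row.getD time 0 = row[time] := List.getD_eq_getElem row 0 ht
    rw [hdrop, List.take_succ_cons]
    show pvALoop row n (fuel + 1) time ss og = _
    unfold pvALoop pvAList
    rw [hget]
    have h' : time + 1 + fuel ≤ row.length := by omega
    cases og with
    | none =>
      dsimp only
      split_ifs <;> exact ih (time + 1) _ _ h'
    | some s =>
      obtain ⟨st, sg, sub⟩ := s
      dsimp only
      split_ifs <;> exact ih (time + 1) _ _ h'

-- the core invariant: A's state machine with an open run (v, k) starting at st equals B's
-- emission of the run-length fold seeded with that open run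
lemma pvMega (n : Int) :
    ∀ (l : List Int) (st k : Nat) (v : Int) (ss : List (List (String × Int))), 0 < k →
      pvFin ((st + k + l.length : Nat) : Int)
        (pvAList n l (st + k) ss
          (if v = -1 then none else some ((st : Int), v, v.tdiv n)))
      = ss ++ pvEmit n (l.foldl pvRunsStep [(v, k)]) st := by
  intro l
  induction l with
  | nil =>
    intro st k v ss hk
    by_cases hv : v = -1 <;> simp [pvAList, pvFin, pvEmit, hv]
  | cons w l ih =>
    intro st k v ss hk
    have hlen : (st + k + (w :: l).length : Nat) = (st + (k + 1)) + l.length := by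
      simp [List.length_cons]; omega
    by_cases hv : v = -1
    · subst hv
      simp only [pvAList]
      by_cases hw : w = -1
      · subst hw
        have : pvRunsStep [((-1 : Int), k)] (-1) = [((-1 : Int), k + 1)] := by
          simp [pvRunsStep]
        simp only [List.foldl_cons, this, ne_eq, not_true_eq_false, if_false, hlen]
        have := ih st (k + 1) (-1) ss (by omega)
        simpa [show st + (k + 1) = st + k + 1 by omega] using this
      · have hstep : pvRunsStep [((-1 : Int), k)] w = [((-1 : Int), k)] ++ [(w, 1)] := by
          simp [pvRunsStep, Ne.symm hw]
        simp only [List.foldl_cons, hstep,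
          pvRuns_foldl_append l [((-1 : Int), k)] [(w, 1)] (by simp)]
        simp only [ne_eq, hw, not_false_iff, if_true, hlen]
        have := ih (st + k) 1 w ss (by omega)
        simp only [hw, if_false] at this
        simpa [show st + k + 1 = st + k + 1 from rfl] using this
    · simp only [if_neg hv, pvAList]
      by_cases hw : w = v
      · subst hw
        have hstep : pvRunsStep [(w, k)] w = [(w, k + 1)] := by simp [pvRunsStep]
        simp only [List.foldl_cons, hstep, ne_eq, not_true_eq_false, if_false, hlen]
        have := ih st (k + 1) w ss (by omega)
        simpa [hv, show st + (k + 1) = st + k + 1 by omega] using this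
      · have hstep : pvRunsStep [(v, k)] w = [(v, k)] ++ [(w, 1)] := by
          simp [pvRunsStep, Ne.symm hw]
        simp only [List.foldl_cons, hstep,
          pvRuns_foldl_append l [(v, k)] [(w, 1)] (by simp)]
        simp only [ne_eq, hw, not_false_iff, if_true, hlen, List.cons_append,
          List.nil_append]
        rw [show st + (k + 1) + l.length = st + k + 1 + l.length by omega]
        rw [← apply_ite
          (pvAList n l (st + k + 1)
            (ss ++ [pvMkSession (st : Int) v (v.tdiv n) ((st + k : Nat) : Int)]))]
        rw [ih (st + k) 1 w _ (by omega)]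
        simp [pvEmit, hv, List.append_assoc]

lemma pvRow (n : Int) (l : List Int) (time : Nat) (ss : List (List (String × Int))) :
    pvFin ((time + l.length : Nat) : Int) (pvAList n l time ss none)
      = ss ++ pvEmit n (l.foldl pvRunsStep []) time := by
  match l with
  | [] => simp [pvAList, pvFin, pvEmit]
  | w :: l =>
    have hlen : (time + (w :: l).length : Nat) = (time + 1) + l.length := by
      simp [List.length_cons]; omega
    have hstep : pvRunsStep [] w = [(w, 1)] := by simp [pvRunsStep]
    simp only [pvAList, List.foldl_cons, hstep, hlen]
    have := pvMega n l time 1 w ss (by omega)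
    by_cases hw : w = -1
    · subst hw
      simpa using this
    · simp only [if_neg hw] at this
      simpa [hw] using this

-- the student loop over range(len(groups)) with groups.getD is a map over groups
lemma pvRangeFold (f : List Int → List (List (String × Int))) :
    ∀ (gs : List (List Int)) (acc : List (List (List (String × Int)))),
      (List.range gs.length).foldl (fun a i => a ++ [f (gs.getD i [])]) acc
        = acc ++ gs.map f := by
  intro gs
  induction gs with
  | nil => intro acc; simp
  | cons g gs ih =>
    intro acc
    rw [List.length_cons, List.range_succ_eq_map, List.foldl_cons, List.foldl_map]
    simp only [List.getD_cons_zero, List.getD_cons_succ]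
    rw [ih (acc ++ [f g])]
    simp

-- ===== VERDICT (by name: the statement is the Claim_ definition above) =====
theorem groups_to_output_spec : Claim_equal_groups_to_output := by
  intro groups _ hpre
  unfold Spec_groups_to_output groups_to_output groups_to_output_alt
  match hg : groups with
  | [] => simp
  | g0 :: rest =>
    simp only
    rw [pvRangeFold (fun row =>
      pvFin (((g0 :: rest).headD []).length : Int)
        (pvALoop row ((g0 :: rest).length : Int) ((g0 :: rest).headD []).length 0 [] none))]
    simp only [List.nil_append]
    apply List.map_congr_left
    intro row hrow
    have hT : ((g0 :: rest).headD []).length ≤ row.length := hpre row hrow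
    have hT2 : ((g0 :: rest).headD []).length = g0.length := rfl
    have hTlen : (row.take ((g0 :: rest).headD []).length).length
        = ((g0 :: rest).headD []).length := by
      simp [List.length_take]; omega
    rw [pvALoop_eq_pvAList row _ _ 0 [] none (by omega), List.drop_zero]
    have := pvRow ((g0 :: rest).length : Int) (row.take ((g0 :: rest).headD []).length) 0 []
    rw [hTlen] at this
    simp only [Nat.zero_add] at this
    rw [this, pvEmit_foldl]
    simp [List.headD]
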